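-- pv_equiv track=rewrite | github.com/amal2018/PaperMap | pages/01_🟢_Data_Upload_and_Study_Area_Map.py | auto_detect_site_column
-- ===== SOURCE A (Python) =====
-- def auto_detect_site_column(columns, lat_col, lon_col, site_keys):
--     # 1. Try keyword-based match
--     for key in site_keys:
--         for col in columns:
--             norm_col = col.strip().lower().replace(" ", "").replace("_", "")
--             if key == norm_col:
--                 return col
--     # 2. Fallback: left of lat/lon
--     try:
--         lat_idx = columns.index(lat_col)
--         if lat_idx > 0:
--             return columns[lat_idx - 1]
--     except ValueError:
--         pass
--     try:
--         lon_idx = columns.index(lon_col)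
--         if lon_idx > 0:
--             return columns[lon_idx - 1]
--     except ValueError:
--         pass
--     # 3. Fallback: right of lat/lon
--     try:
--         lat_idx = columns.index(lat_col)
--         if lat_idx < len(columns) - 1:
--             return columns[lat_idx + 1]
--     except ValueError:
--         pass
--     try:
--         lon_idx = columns.index(lon_col)
--         if lon_idx < len(columns) - 1:
--             return columns[lon_idx + 1]
--     except ValueError:
--         pass
--     return None
-- ===== SOURCE B (Python) =====
-- def auto_detect_site_column(columns, lat_col, lon_col, site_keys):
--     # Single left-to-right pass over columns keeping an argmin accumulator:
--     # each column gets a rank = position of its normalized name in site_keys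
--     # (first occurrence; len(site_keys) if absent), and the column with the
--     # strictly smallest rank seen so far wins.  The same pass also records the
--     # first positions of lat_col / lon_col for the positional fallbacks.
--     n = len(site_keys)
--     rank = {}
--     for i, k in enumerate(site_keys):
--         rank.setdefault(k, i)
--     best_rank = n
--     best_col = None
--     lat_idx = -1
--     lon_idx = -1
--     for i, col in enumerate(columns):
--         r = rank.get(col.strip().lower().replace(" ", "").replace("_", ""), n)
--         if r < best_rank:
--             best_rank = r
--             best_col = col
--         if lat_idx < 0 and col == lat_col:
--             lat_idx = i
--         if lon_idx < 0 and col == lon_col: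
--             lon_idx = i
--     if best_col is not None:
--         return best_col
--     if lat_idx > 0:
--         return columns[lat_idx - 1]
--     if lon_idx > 0:
--         return columns[lon_idx - 1]
--     if 0 <= lat_idx < len(columns) - 1:
--         return columns[lat_idx + 1]
--     if 0 <= lon_idx < len(columns) - 1:
--         return columns[lon_idx + 1]
--     return None
-- ===== Notes on version B (the rewrite author's own statement) =====
-- stated objective: alternative
-- what changed: Replaces A's key-by-key rescans of the column list with a single left-to-right pass over columns that keeps an argmin accumulator (each column's rank = position of its normalized name in site_keys, via a precomputed rank table) and simultaneously records the first positions of lat_col/lon_col for the positional fallbacks, which become a flat if-chain on those recorded indices.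
import Mathlib
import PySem

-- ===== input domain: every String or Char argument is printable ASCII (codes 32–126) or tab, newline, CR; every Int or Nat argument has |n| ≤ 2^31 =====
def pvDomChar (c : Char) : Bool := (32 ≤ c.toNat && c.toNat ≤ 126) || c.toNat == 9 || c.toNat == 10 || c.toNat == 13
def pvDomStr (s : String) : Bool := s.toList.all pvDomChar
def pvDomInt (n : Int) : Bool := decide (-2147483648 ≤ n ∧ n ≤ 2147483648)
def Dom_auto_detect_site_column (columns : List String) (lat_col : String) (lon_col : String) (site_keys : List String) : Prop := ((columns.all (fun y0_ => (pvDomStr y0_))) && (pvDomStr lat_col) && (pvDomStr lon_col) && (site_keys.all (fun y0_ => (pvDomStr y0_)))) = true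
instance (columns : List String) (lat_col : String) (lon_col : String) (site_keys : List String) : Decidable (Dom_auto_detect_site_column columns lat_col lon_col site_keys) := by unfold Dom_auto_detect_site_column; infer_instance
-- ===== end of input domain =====

-- B replaces A's key-by-key rescans with ONE pass over columns keeping an argmin-by-rank
-- accumulator (rank = position of the normalized name in site_keys) that simultaneously
-- records the first positions of lat/lon for the positional fallbacks; objective: alternative.

-- ===== PORT A =====
-- col.strip().lower().replace(" ", "").replace("_", "")
def pvNormA (col : String) : String :=
  PySem.Str.replace (PySem.Str.replace (PySem.Str.lower (PySem.Str.strip col)) " " "") "_" ""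

-- step 4: right of lon
def pvStep4A (columns : List String) (lon_col : String) : Option String :=
  match PySem.List.index? columns lon_col with
  | some i => if (i : Int) < (columns.length : Int) - 1 then PySem.List.pyGet? columns ((i : Int) + 1) else none
  | none => none

-- step 3: right of lat
def pvStep3A (columns : List String) (lat_col lon_col : String) : Option String :=
  match PySem.List.index? columns lat_col with
  | some i => if (i : Int) < (columns.length : Int) - 1 then PySem.List.pyGet? columns ((i : Int) + 1) else pvStep4A columns lon_col
  | none => pvStep4A columns lon_col

-- step 2: left of lon
def pvStep2A (columns : List String) (lat_col lon_col : String) : Option String :=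
  match PySem.List.index? columns lon_col with
  | some i => if 0 < i then PySem.List.pyGet? columns ((i : Int) - 1) else pvStep3A columns lat_col lon_col
  | none => pvStep3A columns lat_col lon_col

-- step 1: left of lat
def pvStep1A (columns : List String) (lat_col lon_col : String) : Option String :=
  match PySem.List.index? columns lat_col with
  | some i => if 0 < i then PySem.List.pyGet? columns ((i : Int) - 1) else pvStep2A columns lat_col lon_col
  | none => pvStep2A columns lat_col lon_col

def auto_detect_site_column (columns : List String) (lat_col : String) (lon_col : String) (site_keys : List String) : Option String :=
  match site_keys.findSome? (fun key => columns.find? (fun col => key == pvNormA col)) with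
  | some c => some c
  | none => pvStep1A columns lat_col lon_col

-- ===== PORT B =====
def pvNormB (col : String) : String :=
  PySem.Str.replace (PySem.Str.replace (PySem.Str.lower (PySem.Str.strip col)) " " "") "_" ""

-- for i, k in enumerate(site_keys): rank.setdefault(k, i)
def pvRankGo : List String → Int → PySem.Dict String Int → PySem.Dict String Int
  | [], _, d => d
  | k :: ks, i, d => pvRankGo ks (i + 1) (d.setdefault k i)

-- one step of B's single pass: state = (i, best_rank, best_col, lat_idx, lon_idx)
def pvScanStep (rank : PySem.Dict String Int) (n : Int) (lat_col lon_col : String)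
    (st : Int × Int × Option String × Int × Int) (col : String) : Int × Int × Option String × Int × Int :=
  let r := rank.getD (pvNormB col) n
  (st.1 + 1,
   if r < st.2.1 then r else st.2.1,
   if r < st.2.1 then some col else st.2.2.1,
   if st.2.2.2.1 < 0 && col == lat_col then st.1 else st.2.2.2.1,
   if st.2.2.2.2 < 0 && col == lon_col then st.1 else st.2.2.2.2)

def auto_detect_site_column_alt (columns : List String) (lat_col : String) (lon_col : String) (site_keys : List String) : Option String :=
  let n : Int := (site_keys.length : Int)
  let rank := pvRankGo site_keys 0 PySem.Dict.empty
  let st := columns.foldl (pvScanStep rank n lat_col lon_col) (0, n, none, -1, -1)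
  match st.2.2.1 with
  | some c => some c
  | none =>
    let la := st.2.2.2.1
    let lo := st.2.2.2.2
    if 0 < la then PySem.List.pyGet? columns (la - 1)
    else if 0 < lo then PySem.List.pyGet? columns (lo - 1)
    else if 0 ≤ la ∧ la < (columns.length : Int) - 1 then PySem.List.pyGet? columns (la + 1)
    else if 0 ≤ lo ∧ lo < (columns.length : Int) - 1 then PySem.List.pyGet? columns (lo + 1)
    else none

-- ===== PRECONDITION & SPEC =====
def Spec_auto_detect_site_column (columns : List String) (lat_col : String) (lon_col : String) (site_keys : List String) (out : Option String) : Prop := out = auto_detect_site_column_alt columns lat_col lon_col site_keys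
instance (columns : List String) (lat_col : String) (lon_col : String) (site_keys : List String) (out : Option String) : Decidable (Spec_auto_detect_site_column columns lat_col lon_col site_keys out) := by unfold Spec_auto_detect_site_column; infer_instance

-- ===== CLAIM (what is proved, stated in full; the proofs are below) =====
def Claim_equal_auto_detect_site_column : Prop := ∀ (columns : List String) (lat_col : String) (lon_col : String) (site_keys : List String), Dom_auto_detect_site_column columns lat_col lon_col site_keys → Spec_auto_detect_site_column columns lat_col lon_col site_keys (auto_detect_site_column columns lat_col lon_col site_keys)

-- ===== LEMMAS AND PROOFS =====

-- rank of a column: first position of its normalized name in site_keys, or len(site_keys)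
def pvRk (keys : List String) (c : String) : Int :=
  ((PySem.List.index? keys (pvNormB c)).map (fun j : Nat => (j : Int))).getD (keys.length : Int)

-- the (best_rank, best_col) part of B's scan, isolated
def pvBestGo (rk : String → Int) : List String → Int → Option String → Int × Option String
  | [], br, bc => (br, bc)
  | c :: cs, br, bc => if rk c < br then pvBestGo rk cs (rk c) (some c) else pvBestGo rk cs br bc

-- the first-position part of B's scan, isolated
def pvPos (ref : String) : List String → Int → Int → Int
  | [], _, la => la
  | c :: cs, i, la => pvPos ref cs (i + 1) (if la < 0 && c == ref then i else la)

def pvMin (rk : String → Int) (cols : List String) (br : Int) : Int :=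
  cols.foldr (fun c acc => min (rk c) acc) br

theorem pvRank_get (ks : List String) (i : Int) (d : PySem.Dict String Int) (s : String) :
    (pvRankGo ks i d).get? s
      = (d.get? s).or ((PySem.List.index? ks s).map (fun j : Nat => i + (j : Int))) := by
  induction ks generalizing i d with
  | nil => simp [pvRankGo]
  | cons k ks ih =>
    rw [pvRankGo, ih]
    by_cases h : s = k
    · subst h
      rw [PySem.List.index?_cons_self, PySem.Dict.get?_setdefault_self]
      cases d.get? s <;> simp
    · rw [PySem.List.index?_cons_of_ne ks (fun e : k = s => h e.symm),
          PySem.Dict.get?_setdefault_of_ne _ _ h]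
      cases d.get? s with
      | some a => simp
      | none =>
        cases PySem.List.index? ks s with
        | none => simp
        | some j => simp; omega

theorem pvRk_eq (keys : List String) (c : String) :
    (pvRankGo keys 0 PySem.Dict.empty).getD (pvNormB c) (keys.length : Int) = pvRk keys c := by
  rw [PySem.Dict.getD_eq_get?_getD, pvRank_get, pvRk]
  cases PySem.List.index? keys (pvNormB c) <;> simp

theorem pvRk_nonneg (keys : List String) (c : String) : 0 ≤ pvRk keys c := by
  rw [pvRk]; cases PySem.List.index? keys (pvNormB c) <;> simp

theorem pvScan_split (rank : PySem.Dict String Int) (n : Int) (lat lon : String)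
    (cols : List String) (i br : Int) (bc : Option String) (la lo : Int) :
    cols.foldl (pvScanStep rank n lat lon) (i, br, bc, la, lo)
      = (i + cols.length,
         (pvBestGo (fun c => rank.getD (pvNormB c) n) cols br bc).1,
         (pvBestGo (fun c => rank.getD (pvNormB c) n) cols br bc).2,
         pvPos lat cols i la, pvPos lon cols i lo) := by
  induction cols generalizing i br bc la lo with
  | nil => simp [pvBestGo, pvPos]
  | cons c cs ih =>
    rw [List.foldl_cons, pvScanStep]
    simp only [pvBestGo, pvPos]
    by_cases h : rank.getD (pvNormB c) n < br <;>
      simp only [h, ite_true, ite_false, ih, List.length_cons, Prod.mk.injEq] <;>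
      exact ⟨by push_cast; ring, trivial⟩

theorem pvPos_of_nonneg (ref : String) (cols : List String) (i la : Int) (h : 0 ≤ la) :
    pvPos ref cols i la = la := by
  induction cols generalizing i with
  | nil => rfl
  | cons c cs ih => rw [pvPos, if_neg (by simp; omega)]; exact ih _

theorem pvPos_neg (ref : String) (cols : List String) (i : Int) (hi : 0 ≤ i) :
    pvPos ref cols i (-1)
      = (match PySem.List.index? cols ref with
         | some j => i + (j : Int)
         | none => -1) := by
  induction cols generalizing i with
  | nil => simp [pvPos]
  | cons c cs ih =>
    rw [pvPos]
    by_cases h : c = ref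
    · subst h
      rw [if_pos (by simp), pvPos_of_nonneg _ _ _ _ hi, PySem.List.index?_cons_self]
      simp
    · rw [if_neg (by simp [h]), ih _ (by omega),
          PySem.List.index?_cons_of_ne cs h]
      cases PySem.List.index? cs ref <;> simp <;> ring

theorem pvMin_le_init (rk : String → Int) (cols : List String) (br : Int) :
    pvMin rk cols br ≤ br := by
  induction cols with
  | nil => simp [pvMin]
  | cons c cs ih => simp only [pvMin, List.foldr_cons] at *; omega

theorem pvMin_le_of_mem (rk : String → Int) {cols : List String} {c : String}
    (h : c ∈ cols) (br : Int) : pvMin rk cols br ≤ rk c := by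
  induction cols with
  | nil => simp at h
  | cons x cs ih =>
    simp only [pvMin, List.foldr_cons]
    rcases List.mem_cons.mp h with h | h
    · subst h; omega
    · have := ih h; simp only [pvMin] at this; omega

theorem pvMin_min_init (rk : String → Int) (cols : List String) (b b' : Int) :
    pvMin rk cols (min b b') = min b (pvMin rk cols b') := by
  induction cols with
  | nil => simp [pvMin]
  | cons c cs ih => simp only [pvMin, List.foldr_cons] at *; omega

theorem pvMin_nonneg (rk : String → Int) (cols : List String) (br : Int)
    (hb : 0 ≤ br) (h : ∀ c ∈ cols, 0 ≤ rk c) : 0 ≤ pvMin rk cols br := by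
  induction cols with
  | nil => simpa [pvMin]
  | cons c cs ih =>
    have h1 := h c (by simp)
    have h2 := ih (fun c hc => h c (by simp [hc]))
    simp only [pvMin, List.foldr_cons] at *; omega

theorem pvMin_add_one (rk rk' : String → Int) (cols : List String) (b : Int)
    (h : ∀ c ∈ cols, rk' c = rk c + 1) :
    pvMin rk' cols (b + 1) = pvMin rk cols b + 1 := by
  induction cols with
  | nil => simp [pvMin]
  | cons c cs ih =>
    have h1 := h c (by simp)
    have h2 := ih (fun c hc => h c (by simp [hc]))
    simp only [pvMin, List.foldr_cons] at *; omega

theorem pv_find?_congr_mem {l : List String} {p q : String → Bool}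
    (h : ∀ c ∈ l, p c = q c) : l.find? p = l.find? q := by
  induction l with
  | nil => rfl
  | cons c cs ih =>
    rw [List.find?_cons, List.find?_cons, h c (by simp),
        ih (fun c hc => h c (by simp [hc]))]

theorem pvBestGo_spec (rk : String → Int) (cols : List String) (br : Int) (bc : Option String) :
    pvBestGo rk cols br bc
      = (pvMin rk cols br,
         if pvMin rk cols br < br
         then cols.find? (fun c => decide (rk c ≤ pvMin rk cols br))
         else bc) := by
  induction cols generalizing br bc with
  | nil => simp [pvBestGo, pvMin]
  | cons c cs ih =>
    have hM : pvMin rk (c :: cs) br = min (rk c) (pvMin rk cs br) := by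
      simp only [pvMin, List.foldr_cons]
    by_cases h : rk c < br
    · rw [pvBestGo, if_pos h, ih]
      have hR : pvMin rk cs (rk c) = min (rk c) (pvMin rk cs br) := by
        have := pvMin_min_init rk cs (rk c) br
        rwa [min_eq_left (le_of_lt h)] at this
      have hle := pvMin_le_init rk cs (rk c)
      by_cases h2 : pvMin rk cs (rk c) < rk c
      · rw [if_pos h2, hM, if_pos (by omega), List.find?_cons_of_neg (by simp; omega), hR]
      · have heq : pvMin rk cs (rk c) = rk c := le_antisymm hle (by omega)
        rw [if_neg h2, hM, if_pos (by omega), List.find?_cons_of_pos (by simp; omega), hR]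
    · rw [pvBestGo, if_neg h, ih]
      have hle := pvMin_le_init rk cs br
      have hmin : min (rk c) (pvMin rk cs br) = pvMin rk cs br := by omega
      rw [hM, hmin]
      by_cases h2 : pvMin rk cs br < br
      · rw [if_pos h2, if_pos h2, List.find?_cons_of_neg (by simp; omega)]
      · rw [if_neg h2, if_neg h2]

-- pvRk on a cons of keys
theorem pvRk_cons_eq (k : String) (ks : List String) (c : String) (h : pvNormB c = k) :
    pvRk (k :: ks) c = 0 := by
  rw [pvRk, h, PySem.List.index?_cons_self]; simp

theorem pvRk_cons_ne (k : String) (ks : List String) (c : String) (h : ¬ pvNormB c = k) :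
    pvRk (k :: ks) c = pvRk ks c + 1 := by
  rw [pvRk, pvRk, PySem.List.index?_cons_of_ne ks (fun e : k = pvNormB c => h e.symm)]
  cases PySem.List.index? ks (pvNormB c) <;> simp

-- A's nested keyword search equals the argmin characterization
theorem pvA_kw (cols : List String) (keys : List String) :
    keys.findSome? (fun k => cols.find? (fun c => k == pvNormB c))
      = (if pvMin (pvRk keys) cols (keys.length : Int) < (keys.length : Int)
         then cols.find? (fun c => decide (pvRk keys c ≤ pvMin (pvRk keys) cols (keys.length : Int)))
         else none) := by
  induction keys with
  | nil =>
    have h0 : ∀ c ∈ cols, 0 ≤ pvRk [] c := fun c _ => pvRk_nonneg [] c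
    have := pvMin_nonneg (pvRk []) cols 0 le_rfl h0
    simp only [List.findSome?_nil, List.length_nil, Nat.cast_zero]
    rw [if_neg (by omega)]
  | cons k ks ih =>
    rw [List.findSome?_cons]
    cases hf : cols.find? (fun c => k == pvNormB c) with
    | some c0 =>
      have hc0 : c0 ∈ cols := List.mem_of_find?_eq_some hf
      have hk : pvNormB c0 = k := by
        have h0 := List.find?_some hf
        simp only [beq_iff_eq] at h0
        exact h0.symm
      have hz : pvRk (k :: ks) c0 = 0 := pvRk_cons_eq k ks c0 hk
      have hnn : ∀ c ∈ cols, 0 ≤ pvRk (k :: ks) c := fun c _ => pvRk_nonneg _ c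
      have hle : pvMin (pvRk (k :: ks)) cols ((k :: ks).length : Int) ≤ 0 := by
        have := pvMin_le_of_mem (pvRk (k :: ks)) hc0 ((k :: ks).length : Int); omega
      have hM0 : pvMin (pvRk (k :: ks)) cols ((k :: ks).length : Int) = 0 := by
        have := pvMin_nonneg (pvRk (k :: ks)) cols ((k :: ks).length : Int) (Int.natCast_nonneg _) hnn
        omega
      have hcongr : cols.find? (fun c => decide (pvRk (k :: ks) c ≤ 0))
          = cols.find? (fun c => k == pvNormB c) := by
        refine pv_find?_congr_mem ?_
        intro c _
        by_cases h : pvNormB c = k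
        · simp [pvRk_cons_eq k ks c h, h]
        · have h1 := pvRk_cons_ne k ks c h
          have h2 := pvRk_nonneg ks c
          have hb : (k == pvNormB c) = false := beq_eq_false_iff_ne.mpr (fun e => h e.symm)
          rw [hb, h1]
          simp only [decide_eq_false_iff_not]
          omega
      have hpos : (0 : Int) < (((k :: ks).length : Nat) : Int) := by
        push_cast [List.length_cons]; omega
      rw [hM0, if_pos hpos, hcongr, hf]
    | none =>
      have hnone : ∀ c ∈ cols, ¬ pvNormB c = k := by
        intro c hc h
        have := List.find?_eq_none.mp hf c hc
        simp [h] at this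
      have hshift : ∀ c ∈ cols, pvRk (k :: ks) c = pvRk ks c + 1 :=
        fun c hc => pvRk_cons_ne k ks c (hnone c hc)
      have hMeq : pvMin (pvRk (k :: ks)) cols ((k :: ks).length : Int)
          = pvMin (pvRk ks) cols (ks.length : Int) + 1 := by
        have : ((k :: ks).length : Int) = (ks.length : Int) + 1 := by push_cast [List.length_cons]; ring
        rw [this]
        exact pvMin_add_one (pvRk ks) (pvRk (k :: ks)) cols _ hshift
      rw [ih, hMeq]
      by_cases h2 : pvMin (pvRk ks) cols ((ks.length : Int)) < (ks.length : Int)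
      · rw [if_pos h2, if_pos (by push_cast [List.length_cons]; omega)]
        refine pv_find?_congr_mem ?_
        intro c hc
        have := hshift c hc
        simp only [decide_eq_decide]
        omega
      · rw [if_neg h2, if_neg (by push_cast [List.length_cons]; omega)]

-- the positional fallbacks agree
theorem pv_fallback_eq (columns : List String) (lat_col lon_col : String) :
    pvStep1A columns lat_col lon_col
      = (if 0 < pvPos lat_col columns 0 (-1) then
           PySem.List.pyGet? columns (pvPos lat_col columns 0 (-1) - 1)
         else if 0 < pvPos lon_col columns 0 (-1) then
           PySem.List.pyGet? columns (pvPos lon_col columns 0 (-1) - 1)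
         else if 0 ≤ pvPos lat_col columns 0 (-1) ∧ pvPos lat_col columns 0 (-1) < (columns.length : Int) - 1 then
           PySem.List.pyGet? columns (pvPos lat_col columns 0 (-1) + 1)
         else if 0 ≤ pvPos lon_col columns 0 (-1) ∧ pvPos lon_col columns 0 (-1) < (columns.length : Int) - 1 then
           PySem.List.pyGet? columns (pvPos lon_col columns 0 (-1) + 1)
         else none) := by
  rw [pvPos_neg _ _ _ le_rfl, pvPos_neg _ _ _ le_rfl]
  unfold pvStep1A pvStep2A pvStep3A pvStep4A
  rcases hla : PySem.List.index? columns lat_col with _ | i <;>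
    rcases hlo : PySem.List.index? columns lon_col with _ | j <;>
    simp only [Int.zero_add] <;>
    split_ifs <;> first | rfl | omega

-- ===== VERDICT (by name: the statement is the Claim_ definition above) =====
theorem auto_detect_site_column_spec : Claim_equal_auto_detect_site_column := by
  intro columns lat_col lon_col site_keys _
  unfold Spec_auto_detect_site_column auto_detect_site_column auto_detect_site_column_alt
  dsimp only
  rw [pvScan_split]
  have hrk : (fun c => (pvRankGo site_keys 0 PySem.Dict.empty).getD (pvNormB c) (site_keys.length : Int))
      = pvRk site_keys := funext (fun c => pvRk_eq site_keys c)
  simp only [hrk, pvBestGo_spec]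
  have hnorm : pvNormA = pvNormB := rfl
  rw [hnorm, pvA_kw columns site_keys]
  by_cases h : pvMin (pvRk site_keys) columns (site_keys.length : Int) < (site_keys.length : Int)
  · rw [if_pos h]
    cases columns.find? (fun c => decide (pvRk site_keys c ≤ pvMin (pvRk site_keys) columns (site_keys.length : Int))) with
    | some c => rfl
    | none => exact pv_fallback_eq columns lat_col lon_col
  · rw [if_neg h]
    exact pv_fallback_eq columns lat_col lon_col
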